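-- pv_equiv track=rewrite | github.com/SaudiLinux/Loot | modules/vuln_scanner.py | generate_exploitation_paths
-- ===== SOURCE A (Python) =====
-- def generate_exploitation_paths(vulnerabilities):
--     """Generate exploitation paths"""
--     paths = []
--
--     # Find chains of vulnerabilities
--     if any(v['type'] == 'SQL Injection' for v in vulnerabilities):
--         paths.append('SQL Injection → Data Extraction → Privilege Escalation')
--
--     if any(v['type'] == 'Cross-Site Scripting (XSS)' for v in vulnerabilities):
--         paths.append('XSS → Session Hijacking → Account Takeover')
--
--     if any('LFI' in v['type'] for v in vulnerabilities):
--         paths.append('LFI → Source Code Analysis → Further Exploitation')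
--
--     if any('Command Injection' in v['type'] for v in vulnerabilities):
--         paths.append('Command Injection → Reverse Shell → System Compromise')
--
--     return paths
-- ===== SOURCE B (Python) =====
-- def generate_exploitation_paths(vulnerabilities):
--     """Generate exploitation paths (single pass maintaining four flags)"""
--     has_sql = has_xss = has_lfi = has_cmd = False
--     for v in vulnerabilities:
--         t = v['type']
--         has_sql = has_sql or t == 'SQL Injection'
--         has_xss = has_xss or t == 'Cross-Site Scripting (XSS)'
--         has_lfi = has_lfi or 'LFI' in t
--         has_cmd = has_cmd or 'Command Injection' in t
--     paths = []
--     if has_sql: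
--         paths.append('SQL Injection → Data Extraction → Privilege Escalation')
--     if has_xss:
--         paths.append('XSS → Session Hijacking → Account Takeover')
--     if has_lfi:
--         paths.append('LFI → Source Code Analysis → Further Exploitation')
--     if has_cmd:
--         paths.append('Command Injection → Reverse Shell → System Compromise')
--     return paths
-- ===== Notes on version B (the rewrite author's own statement) =====
-- stated objective: alternative
-- what changed: Four independent any(...) scans over the list are replaced by a single pass that maintains four boolean flags and emits the fixed path strings afterwards (one traversal instead of four).
import Mathlib
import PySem

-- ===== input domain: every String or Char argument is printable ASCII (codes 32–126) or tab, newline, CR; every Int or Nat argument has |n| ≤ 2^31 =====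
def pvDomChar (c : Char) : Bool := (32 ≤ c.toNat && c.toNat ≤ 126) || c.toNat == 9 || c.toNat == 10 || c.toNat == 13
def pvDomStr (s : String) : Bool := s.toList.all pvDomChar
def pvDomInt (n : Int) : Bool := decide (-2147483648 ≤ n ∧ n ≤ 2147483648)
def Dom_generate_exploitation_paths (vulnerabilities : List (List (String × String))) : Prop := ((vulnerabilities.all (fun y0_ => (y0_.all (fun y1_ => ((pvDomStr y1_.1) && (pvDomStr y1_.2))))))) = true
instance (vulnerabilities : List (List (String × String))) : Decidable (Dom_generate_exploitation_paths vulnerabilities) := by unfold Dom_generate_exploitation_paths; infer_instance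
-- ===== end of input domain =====

-- B replaces A's four independent any(...) scans with one pass maintaining four boolean flags
-- (equivalence of the RETURN value on inputs where every dict has a 'type' key).

-- ===== PORT A =====
-- v['type'] : first match in the association list (Pre_ guarantees presence; "" never reached there)
def pvType (v : List (String × String)) : String :=
  (((v.find? (fun p => p.1 == "type")).map (·.2)).getD "")

def generate_exploitation_paths (vulnerabilities : List (List (String × String))) : List String :=
  let paths : List String := []
  let paths := if vulnerabilities.any (fun v => pvType v == "SQL Injection") then
    paths ++ ["SQL Injection → Data Extraction → Privilege Escalation"] else paths
  let paths := if vulnerabilities.any (fun v => pvType v == "Cross-Site Scripting (XSS)") then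
    paths ++ ["XSS → Session Hijacking → Account Takeover"] else paths
  let paths := if vulnerabilities.any (fun v => PySem.Str.isIn "LFI" (pvType v)) then
    paths ++ ["LFI → Source Code Analysis → Further Exploitation"] else paths
  let paths := if vulnerabilities.any (fun v => PySem.Str.isIn "Command Injection" (pvType v)) then
    paths ++ ["Command Injection → Reverse Shell → System Compromise"] else paths
  paths

-- ===== PORT B =====
def generate_exploitation_paths_alt (vulnerabilities : List (List (String × String))) : List String :=
  let flags := vulnerabilities.foldl
    (fun (acc : Bool × Bool × Bool × Bool) v =>
      let t := pvType v
      (acc.1 || t == "SQL Injection",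
       acc.2.1 || t == "Cross-Site Scripting (XSS)",
       acc.2.2.1 || PySem.Str.isIn "LFI" t,
       acc.2.2.2 || PySem.Str.isIn "Command Injection" t))
    (false, false, false, false)
  let paths : List String := []
  let paths := if flags.1 then paths ++ ["SQL Injection → Data Extraction → Privilege Escalation"] else paths
  let paths := if flags.2.1 then paths ++ ["XSS → Session Hijacking → Account Takeover"] else paths
  let paths := if flags.2.2.1 then paths ++ ["LFI → Source Code Analysis → Further Exploitation"] else paths
  let paths := if flags.2.2.2 then paths ++ ["Command Injection → Reverse Shell → System Compromise"] else paths
  paths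

-- ===== PRECONDITION & SPEC =====
-- Pre_ excludes lists containing a dict without a 'type' key: A raises KeyError on almost all of
-- them, and on the rare such inputs where A's short-circuiting any(...) never reaches the bad dict
-- and still returns, B's single pass (which reads v['type'] of every element) raises KeyError.
def Pre_generate_exploitation_paths (vulnerabilities : List (List (String × String))) : Prop :=
  ∀ v ∈ vulnerabilities, v.any (fun p => p.1 == "type") = true
instance (vulnerabilities : List (List (String × String))) : Decidable (Pre_generate_exploitation_paths vulnerabilities) := by unfold Pre_generate_exploitation_paths; infer_instance

def pvWitness_generate_exploitation_paths : (List (List (String × String))) :=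
  [[("type", "SQL Injection")], [("type", "has LFI inside"), ("x", "y")]]

def Spec_generate_exploitation_paths (vulnerabilities : List (List (String × String))) (out : List String) : Prop := out = generate_exploitation_paths_alt vulnerabilities
instance (vulnerabilities : List (List (String × String))) (out : List String) : Decidable (Spec_generate_exploitation_paths vulnerabilities out) := by unfold Spec_generate_exploitation_paths; infer_instance

-- ===== CLAIM (what is proved, stated in full; the proofs are below) =====
def Claim_equal_generate_exploitation_paths : Prop := ∀ (vulnerabilities : List (List (String × String))), Dom_generate_exploitation_paths vulnerabilities → Pre_generate_exploitation_paths vulnerabilities → Spec_generate_exploitation_paths vulnerabilities (generate_exploitation_paths vulnerabilities)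

-- ===== LEMMAS AND PROOFS =====

-- the one-pass fold computes exactly the four any-scans
theorem pv_flags_eq (vs : List (List (String × String))) (a b c d : Bool) :
    vs.foldl
      (fun (acc : Bool × Bool × Bool × Bool) v =>
        let t := pvType v
        (acc.1 || t == "SQL Injection",
         acc.2.1 || t == "Cross-Site Scripting (XSS)",
         acc.2.2.1 || PySem.Str.isIn "LFI" t,
         acc.2.2.2 || PySem.Str.isIn "Command Injection" t))
      (a, b, c, d) =
    (a || vs.any (fun v => pvType v == "SQL Injection"),
     b || vs.any (fun v => pvType v == "Cross-Site Scripting (XSS)"),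
     c || vs.any (fun v => PySem.Str.isIn "LFI" (pvType v)),
     d || vs.any (fun v => PySem.Str.isIn "Command Injection" (pvType v))) := by
  induction vs generalizing a b c d with
  | nil => simp
  | cons v vs ih => rw [List.foldl_cons, ih]; simp [List.any_cons, Bool.or_assoc]

-- ===== VERDICT (by name: the statement is the Claim_ definition above) =====
theorem generate_exploitation_paths_spec : Claim_equal_generate_exploitation_paths := by
  intro vs _ _
  unfold Spec_generate_exploitation_paths generate_exploitation_paths generate_exploitation_paths_alt
  rw [pv_flags_eq]
  simp
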